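-- pv_equiv track=rewrite | github.com/arpitragarwal/kindle-character-dictionary | gcide2tab.py | extract_def_content
-- ===== SOURCE A (Python) =====
-- def extract_def_content(entry_text, start):
--     """Extract content between <def> and matching </def> starting at start.
--     Handles nested tags inside <def>...</def>.
--     Returns (definition_text, end_position).
--     """
--     depth = 0
--     i = start
--     begin = None
--     while i < len(entry_text):
--         if entry_text[i:i+5] == '<def>':
--             if depth == 0:
--                 begin = i + 5
--             depth += 1
--             i += 5
--             continue
--         if entry_text[i:i+6] == '</def>':
--             depth -= 1
--             if depth == 0:
--                 return entry_text[begin:i], i + 6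
--             i += 6
--             continue
--         i += 1
--     return None, start
-- ===== SOURCE B (Python) =====
-- def extract_def_content(entry_text, start):
--     """Extract content between <def> and matching </def> starting at start.
--
--     Jumps between tag occurrences with str.find instead of scanning
--     character by character.
--     """
--     depth = 0
--     begin = None
--     i = start
--     while True:
--         c = entry_text.find('</def>', i)
--         if c == -1:
--             return None, start
--         o = entry_text.find('<def>', i)
--         if o != -1 and o < c:
--             if depth == 0:
--                 begin = o + 5
--             depth += 1
--             i = o + 5
--         else:
--             depth -= 1
--             if depth == 0:
--                 return entry_text[begin:c], c + 6
--             i = c + 6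
-- ===== Notes on version B (the rewrite author's own statement) =====
-- stated objective: faster
-- what changed: B replaces A's character-by-character scan with repeated slice comparisons by str.find jumps to the next '<def>'/'</def>' occurrence, processing one tag per loop iteration instead of one character.
-- outside the precondition, e.g. on extract_def_content('<def>x</def>', -12): A returns (None, -12), B returns ('x', 12)
import Mathlib
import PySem

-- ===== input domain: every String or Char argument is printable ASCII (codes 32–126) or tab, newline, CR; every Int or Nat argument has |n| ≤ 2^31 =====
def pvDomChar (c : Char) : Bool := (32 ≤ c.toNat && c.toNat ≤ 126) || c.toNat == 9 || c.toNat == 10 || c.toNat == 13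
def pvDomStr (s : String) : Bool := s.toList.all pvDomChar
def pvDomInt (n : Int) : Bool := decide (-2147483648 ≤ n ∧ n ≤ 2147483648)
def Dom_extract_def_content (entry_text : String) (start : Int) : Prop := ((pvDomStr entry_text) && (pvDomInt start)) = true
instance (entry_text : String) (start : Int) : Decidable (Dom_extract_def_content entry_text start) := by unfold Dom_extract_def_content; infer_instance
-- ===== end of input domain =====

-- B replaces A's char-by-char scan with str.find jumps to the next tag occurrence (one loop step per tag);
-- equivalence is proved for 0 ≤ start (Pre_ below excludes negative start).


-- ===== PORT A =====
-- A's while loop: one step per character position i, slice comparisons for the two tags.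
def extractLoopA (cs : List Char) (start i depth : Int) (begin? : Option Int) :
    Option String × Int :=
  if h : i < (cs.length : Int) then
    if PySem.List.slice cs (some i) (some (i + 5)) = "<def>".toList then
      extractLoopA cs start (i + 5) (depth + 1) (if depth = 0 then some (i + 5) else begin?)
    else if PySem.List.slice cs (some i) (some (i + 6)) = "</def>".toList then
      if depth - 1 = 0 then
        (some (String.ofList (PySem.List.slice cs begin? (some i))), i + 6)
      else
        extractLoopA cs start (i + 6) (depth - 1) begin?
    else
      extractLoopA cs start (i + 1) depth begin?
  else
    (none, start)
termination_by ((cs.length : Int) - i).toNat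
decreasing_by all_goals omega

def extract_def_content (entry_text : String) (start : Int) : Option String × Int :=
  extractLoopA entry_text.toList start start 0 none

-- ===== PORT B =====
-- termination facts about str.find(sub, i) used by the loop below (cited in decreasing_by)
theorem pvFindFromBounds (s sub : List Char) (i : Int)
    (h : PySem.Chars.findFrom s sub i none ≠ -1) :
    i ≤ PySem.Chars.findFrom s sub i none ∧ 0 ≤ PySem.Chars.findFrom s sub i none ∧
      PySem.Chars.findFrom s sub i none ≤ (s.length : Int) := by
  have hb := PySem.Chars.neg_one_le_find (List.drop (if i < 0 then (if i + s.length < 0 then 0 else i + s.length) else i).toNat (List.take (s.length : Int).toNat s)) sub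
  have hl := PySem.Chars.find_le_length (List.drop (if i < 0 then (if i + s.length < 0 then 0 else i + s.length) else i).toNat (List.take (s.length : Int).toNat s)) sub
  simp only [PySem.Chars.findFrom] at h ⊢
  split_ifs at h ⊢ with h1 h2 h3 <;>
    simp_all [List.length_drop] <;> omega

-- B's loop: one step per tag occurrence, jumping with find.
def extractLoopB (cs : List Char) (start i depth : Int) (begin? : Option Int) :
    Option String × Int :=
  let c := PySem.Chars.findFrom cs "</def>".toList i none
  if hc : c = -1 then
    (none, start)
  else
    let o := PySem.Chars.findFrom cs "<def>".toList i none
    if ho : o ≠ -1 ∧ o < c then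
      extractLoopB cs start (o + 5) (depth + 1) (if depth = 0 then some (o + 5) else begin?)
    else
      if depth - 1 = 0 then
        (some (String.ofList (PySem.List.slice cs begin? (some c))), c + 6)
      else
        extractLoopB cs start (c + 6) (depth - 1) begin?
termination_by ((cs.length : Int) + 7 - i).toNat
decreasing_by
  · have := pvFindFromBounds cs "<def>".toList i ho.1
    omega
  · have := pvFindFromBounds cs "</def>".toList i hc
    omega

def extract_def_content_alt (entry_text : String) (start : Int) : Option String × Int :=
  extractLoopB entry_text.toList start start 0 none

-- ===== PRECONDITION & SPEC =====
-- Pre_ excludes only a negative start combined with a text that contains '</def>': there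
-- Python's negative-slice wraparound makes A scan a shifted suffix (skipping the region near
-- the end) and possibly return negative positions — accidental behaviour of A's slicing that
-- no caller of this parser helper relies on; B's str.find clamps a negative start to 0 instead.
-- (With no '</def>' in the text both programs return (None, start) for every start, so those
-- inputs stay inside Pre_.)
def Pre_extract_def_content (entry_text : String) (start : Int) : Prop :=
  0 ≤ start ∨ PySem.Str.isIn "</def>" entry_text = false
instance (entry_text : String) (start : Int) : Decidable (Pre_extract_def_content entry_text start) := by unfold Pre_extract_def_content; infer_instance

def pvWitness_extract_def_content : String × Int := ("<def>a<def>b</def>c</def>!", 0)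

def Spec_extract_def_content (entry_text : String) (start : Int) (out : Option String × Int) : Prop := out = extract_def_content_alt entry_text start
instance (entry_text : String) (start : Int) (out : Option String × Int) : Decidable (Spec_extract_def_content entry_text start out) := by unfold Spec_extract_def_content; infer_instance

-- ===== CLAIM (what is proved, stated in full; the proofs are below) =====
def Claim_equal_extract_def_content : Prop := ∀ (entry_text : String) (start : Int), Dom_extract_def_content entry_text start → Pre_extract_def_content entry_text start → Spec_extract_def_content entry_text start (extract_def_content entry_text start)

-- ===== LEMMAS AND PROOFS =====

-- a 5/6-char Python slice equals the tag iff the tag is a prefix of the suffix at i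
theorem pvSliceEqIffPrefix (cs sub : List Char) (i m : Int) (hi : 0 ≤ i)
    (hm : (sub.length : Int) = m) :
    (PySem.List.slice cs (some i) (some (i + m)) = sub ↔ sub <+: cs.drop i.toNat) := by
  rw [PySem.List.slice_toNat cs hi (by omega)]
  have h2 : ((i + m).toNat - i.toNat) = sub.length := by omega
  rw [h2, List.prefix_iff_eq_take]
  exact ⟨fun h => h.symm, fun h => h.symm⟩

theorem pvFindEqZero (l sub : List Char) (h : sub <+: l) : PySem.Chars.find l sub = 0 := by
  have h0 : 0 ≤ PySem.Chars.find l sub := (PySem.Chars.find_nonneg_iff l sub).2 h.isInfix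
  rcases lt_or_eq_of_le h0 with hlt | heq
  · exfalso
    exact ((PySem.Chars.find_spec h0).2 0 (by omega)) (by simpa using h)
  · omega

theorem pvFindFromAt (cs sub : List Char) (i : Int) (hi : 0 ≤ i)
    (hle : i ≤ (cs.length : Int)) (h : sub <+: cs.drop i.toNat) :
    PySem.Chars.findFrom cs sub i none = i := by
  have hk : (i.toNat : Int) = i := by omega
  have := PySem.Chars.findFrom_natCast cs sub i.toNat (by omega)
  rw [hk] at this
  rw [this, pvFindEqZero _ _ h]
  simp

theorem pvFindFromGt (cs sub : List Char) (i : Int) (h : (cs.length : Int) < i) :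
    PySem.Chars.findFrom cs sub i none = -1 := by
  simp only [PySem.Chars.findFrom]
  split_ifs <;> first | rfl | omega

-- find on c :: t when the pattern does not start at the head
theorem pvFindCons (c : Char) (t sub : List Char) (hnp : ¬ sub <+: (c :: t)) :
    PySem.Chars.find (c :: t) sub =
      if PySem.Chars.find t sub = -1 then -1 else 1 + PySem.Chars.find t sub := by
  by_cases ht : PySem.Chars.find t sub = -1
  · simp only [ht, if_true]
    rw [PySem.Chars.find_eq_neg_one_iff] at ht ⊢
    intro hinf
    rcases List.infix_cons_iff.1 hinf with hp | hinf'
    · exact hnp hp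
    · exact ht hinf'
  · simp only [ht, if_false]
    have h0t : 0 ≤ PySem.Chars.find t sub := by
      have := PySem.Chars.neg_one_le_find t sub; omega
    obtain ⟨hpt, hmint⟩ := PySem.Chars.find_spec h0t
    have h0 : 0 ≤ PySem.Chars.find (c :: t) sub := by
      rw [PySem.Chars.find_nonneg_iff]
      exact List.infix_cons (hpt.isInfix.trans (List.drop_suffix _ t).isInfix)
    obtain ⟨hpc, hminc⟩ := PySem.Chars.find_spec h0
    have hne : (PySem.Chars.find (c :: t) sub).toNat ≠ 0 := by
      intro h0'
      rw [h0'] at hpc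
      exact hnp (by simpa using hpc)
    -- find (c::t) = 1 + find t by minimality both ways
    have h1 : (PySem.Chars.find t sub).toNat + 1 ≤ (PySem.Chars.find (c :: t) sub).toNat := by
      by_contra hlt
      obtain ⟨j, hj⟩ := Nat.exists_eq_succ_of_ne_zero hne
      rw [hj] at hlt hpc
      exact hmint j (by omega) (by simpa using hpc)
    have h2 : (PySem.Chars.find (c :: t) sub).toNat ≤ (PySem.Chars.find t sub).toNat + 1 := by
      by_contra hlt
      exact hminc ((PySem.Chars.find t sub).toNat + 1) (by omega) (by simpa using hpt)
    omega

theorem pvFindFromStep (cs sub : List Char) (i : Int) (hi : 0 ≤ i) (hsub : sub ≠ [])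
    (hnp : ¬ sub <+: cs.drop i.toNat) :
    PySem.Chars.findFrom cs sub i none = PySem.Chars.findFrom cs sub (i + 1) none := by
  by_cases hgt : (cs.length : Int) < i
  · rw [pvFindFromGt cs sub i hgt, pvFindFromGt cs sub (i + 1) (by omega)]
  · by_cases heq : i = (cs.length : Int)
    · have h1 : PySem.Chars.findFrom cs sub i none = -1 := by
        have hk : (i.toNat : Int) = i := by omega
        rw [← hk, PySem.Chars.findFrom_natCast_eq_neg_one_iff cs sub i.toNat (by omega)]
        have : cs.drop i.toNat = [] := by
          apply List.drop_eq_nil_of_le; omega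
        rw [this]
        simpa [List.infix_iff_prefix_suffix] using fun h => hsub (List.eq_nil_of_prefix_nil h)
      rw [h1, pvFindFromGt cs sub (i + 1) (by omega)]
    · have hklt : i.toNat < cs.length := by omega
      have hk : (i.toNat : Int) = i := by omega
      have hdrop : cs.drop i.toNat = cs[i.toNat] :: cs.drop (i.toNat + 1) := by
        exact (List.drop_eq_getElem_cons hklt)
      have e1 := PySem.Chars.findFrom_natCast cs sub i.toNat (by omega)
      have e2 := PySem.Chars.findFrom_natCast cs sub (i.toNat + 1) (by omega)
      rw [hk] at e1
      have hk1 : ((i.toNat + 1 : Nat) : Int) = i + 1 := by omega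
      rw [hk1] at e2
      rw [e1, e2]
      rw [hdrop] at hnp ⊢
      rw [pvFindCons _ _ _ hnp]
      by_cases hmt : PySem.Chars.find (cs.drop (i.toNat + 1)) sub = -1
      · simp [hmt]
      · simp only [hmt, if_false]
        have := PySem.Chars.neg_one_le_find (cs.drop (i.toNat + 1)) sub
        have hne : ¬ (1 + PySem.Chars.find (cs.drop (i.toNat + 1)) sub = -1) := by omega
        simp only [hne, if_false]
        omega

theorem pvDropSuffix (cs : List Char) (i : Int) (m : Nat) (hi : 0 ≤ i) :
    cs.drop (i + (m : Int)).toNat <:+ cs.drop i.toNat := by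
  have h : cs.drop (i + (m : Int)).toNat = (cs.drop i.toNat).drop m := by
    rw [List.drop_drop]; congr 1; omega
  rw [h]; exact List.drop_suffix _ _

-- if no '</def>' occurs at or after position i, A's loop falls through to (None, start)
theorem pvANoClose (cs : List Char) (start i depth : Int) (begin? : Option Int) (hi : 0 ≤ i)
    (hno : ¬ ("</def>".toList <:+: cs.drop i.toNat)) :
    extractLoopA cs start i depth begin? = (none, start) := by
  rw [extractLoopA]
  by_cases h1 : i < (cs.length : Int)
  · rw [dif_pos h1]
    by_cases h2 : PySem.List.slice cs (some i) (some (i + 5)) = "<def>".toList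
    · rw [if_pos h2]
      exact pvANoClose cs start (i + 5) _ _ (by omega)
        (fun hinf => hno (hinf.trans (pvDropSuffix cs i 5 hi).isInfix))
    · rw [if_neg h2]
      have h3 : ¬ PySem.List.slice cs (some i) (some (i + 6)) = "</def>".toList := by
        rw [pvSliceEqIffPrefix cs "</def>".toList i 6 hi (by decide)]
        exact fun hp => hno hp.isInfix
      rw [if_neg h3]
      exact pvANoClose cs start (i + 1) _ _ (by omega)
        (fun hinf => hno (hinf.trans (pvDropSuffix cs i 1 hi).isInfix))
  · rw [dif_neg h1]
termination_by ((cs.length : Int) - i).toNat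
decreasing_by all_goals omega

-- any Python slice of cs is a contiguous part of cs
theorem pvSliceInfix (cs : List Char) (a? b? : Option Int) :
    PySem.List.slice cs a? b? <:+: cs := by
  simp only [PySem.List.slice]
  exact ((List.take_prefix _ _).isInfix).trans (List.drop_suffix _ _).isInfix

-- a successful find means the pattern occurs somewhere in cs
theorem pvFindFromInfix (cs sub : List Char) (i : Int)
    (h : PySem.Chars.findFrom cs sub i none ≠ -1) : sub <:+: cs := by
  simp only [PySem.Chars.findFrom] at h
  split_ifs at h
  all_goals
    first
      | exact absurd rfl h
      | (rename_i hfind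
         exact (((PySem.Chars.find_ne_neg_one_iff _ sub).1 hfind).trans
           (List.drop_suffix _ _).isInfix).trans (List.take_prefix _ _).isInfix)

-- if '</def>' occurs nowhere in cs, A's loop falls through to (None, start) from ANY i
theorem pvANoCloseAll (cs : List Char) (start i depth : Int) (begin? : Option Int)
    (hno : ¬ ("</def>".toList <:+: cs)) :
    extractLoopA cs start i depth begin? = (none, start) := by
  rw [extractLoopA]
  by_cases h1 : i < (cs.length : Int)
  · rw [dif_pos h1]
    by_cases h2 : PySem.List.slice cs (some i) (some (i + 5)) = "<def>".toList
    · rw [if_pos h2]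
      exact pvANoCloseAll cs start (i + 5) _ _ hno
    · rw [if_neg h2]
      have h3 : ¬ PySem.List.slice cs (some i) (some (i + 6)) = "</def>".toList := by
        intro he
        exact hno (he ▸ pvSliceInfix cs (some i) (some (i + 6)))
      rw [if_neg h3]
      exact pvANoCloseAll cs start (i + 1) _ _ hno
  · rw [dif_neg h1]
termination_by ((cs.length : Int) - i).toNat
decreasing_by all_goals omega

-- the two tags cannot both start at the same position
theorem pvNotBoth (l : List Char) (ho : "<def>".toList <+: l) (hc : "</def>".toList <+: l) :
    False := by
  have h := List.prefix_of_prefix_length_le ho hc (by decide)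
  exact absurd h (by decide)

-- main lockstep lemma: for 0 ≤ i the two loops agree
theorem pvMain (n : Nat) (cs : List Char) (start i depth : Int) (begin? : Option Int)
    (hi : 0 ≤ i) (hn : ((cs.length : Int) + 1 - i).toNat ≤ n) :
    extractLoopA cs start i depth begin? = extractLoopB cs start i depth begin? := by
  induction n generalizing i depth begin? with
  | zero =>
    -- i > length: both fall through
    have hgt : (cs.length : Int) < i := by omega
    rw [extractLoopA, extractLoopB]
    simp [pvFindFromGt cs _ i hgt, dif_neg (by omega : ¬ i < (cs.length : Int))]
  | succ n ih =>
    by_cases hlt : i < (cs.length : Int)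
    · by_cases hop : "<def>".toList <+: cs.drop i.toNat
      · -- open tag at i
        have hA : PySem.List.slice cs (some i) (some (i + 5)) = "<def>".toList :=
          (pvSliceEqIffPrefix cs "<def>".toList i 5 hi (by decide)).2 hop
        have hOfind : PySem.Chars.findFrom cs "<def>".toList i none = i :=
          pvFindFromAt cs _ i hi (by omega) hop
        rw [extractLoopA, extractLoopB]
        by_cases hc : PySem.Chars.findFrom cs "</def>".toList i none = -1
        · -- no close ahead: B returns (none, start); A falls through too
          rw [dif_pos hc, dif_pos hlt, if_pos hA]
          apply pvANoClose cs start (i + 5) _ _ (by omega)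
          have hk : (i.toNat : Int) = i := by omega
          have := (PySem.Chars.findFrom_natCast_eq_neg_one_iff cs "</def>".toList i.toNat
            (by omega))
          rw [hk] at this
          have hno := this.1 hc
          exact fun hinf => hno (hinf.trans (pvDropSuffix cs i 5 hi).isInfix)
        · obtain ⟨hge, h0, hle⟩ := pvFindFromBounds cs "</def>".toList i hc
          have hcne : PySem.Chars.findFrom cs "</def>".toList i none ≠ i := by
            intro he
            have hcp : "</def>".toList <+: cs.drop i.toNat := by
              have hk : (i.toNat : Int) = i := by omega
              have hs := PySem.Chars.findFrom_natCast_spec cs "</def>".toList i.toNat (by omega)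
              rw [hk] at hs
              obtain ⟨_, hp, _⟩ := hs hc
              rw [he] at hp
              exact hp
            exact pvNotBoth _ hop hcp
          rw [dif_neg hc, dif_pos hlt, if_pos hA, hOfind,
            dif_pos ⟨by omega, by omega⟩]
          exact ih (i + 5) (depth + 1) _ (by omega) (by omega)
      · by_cases hcl : "</def>".toList <+: cs.drop i.toNat
        · -- close tag at i
          have hA5 : ¬ PySem.List.slice cs (some i) (some (i + 5)) = "<def>".toList := by
            rw [pvSliceEqIffPrefix cs "<def>".toList i 5 hi (by decide)]; exact hop
          have hA6 : PySem.List.slice cs (some i) (some (i + 6)) = "</def>".toList :=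
            (pvSliceEqIffPrefix cs "</def>".toList i 6 hi (by decide)).2 hcl
          have hCfind : PySem.Chars.findFrom cs "</def>".toList i none = i :=
            pvFindFromAt cs _ i hi (by omega) hcl
          have hOno : ¬ (PySem.Chars.findFrom cs "<def>".toList i none ≠ -1 ∧
              PySem.Chars.findFrom cs "<def>".toList i none <
                PySem.Chars.findFrom cs "</def>".toList i none) := by
            rintro ⟨hne, hlt'⟩
            obtain ⟨hge, h0, hle⟩ := pvFindFromBounds cs "<def>".toList i hne
            rw [hCfind] at hlt'
            omega
          rw [extractLoopA, extractLoopB]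
          rw [dif_pos hlt, if_neg hA5, if_pos hA6]
          rw [dif_neg (by rw [hCfind]; omega), dif_neg hOno, hCfind]
          by_cases hd : depth - 1 = 0
          · rw [if_pos hd, if_pos hd]
          · rw [if_neg hd, if_neg hd]
            exact ih (i + 6) (depth - 1) begin? (by omega) (by omega)
        · -- no tag at i: A steps one char; B's finds are unchanged
          have hA5 : ¬ PySem.List.slice cs (some i) (some (i + 5)) = "<def>".toList := by
            rw [pvSliceEqIffPrefix cs "<def>".toList i 5 hi (by decide)]; exact hop
          have hA6 : ¬ PySem.List.slice cs (some i) (some (i + 6)) = "</def>".toList := by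
            rw [pvSliceEqIffPrefix cs "</def>".toList i 6 hi (by decide)]; exact hcl
          have hstep : extractLoopB cs start i depth begin? =
              extractLoopB cs start (i + 1) depth begin? := by
            conv_lhs => rw [extractLoopB]
            conv_rhs => rw [extractLoopB]
            rw [pvFindFromStep cs "</def>".toList i hi (by decide) hcl,
              pvFindFromStep cs "<def>".toList i hi (by decide) hop]
          rw [extractLoopA, dif_pos hlt, if_neg hA5, if_neg hA6,
            ih (i + 1) depth begin? (by omega) (by omega), ← hstep]
    · -- i ≥ length: A falls through; B finds nothing
      rw [extractLoopA, extractLoopB, dif_neg (by omega : ¬ i < (cs.length : Int))]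
      by_cases heq : i = (cs.length : Int)
      · have h1 : PySem.Chars.findFrom cs "</def>".toList i none = -1 := by
          have hk : (i.toNat : Int) = i := by omega
          rw [← hk, PySem.Chars.findFrom_natCast_eq_neg_one_iff cs _ i.toNat (by omega)]
          have hd : cs.drop i.toNat = [] := List.drop_eq_nil_of_le (by omega)
          rw [hd]
          decide
        rw [dif_pos h1]
      · rw [dif_pos (pvFindFromGt cs _ i (by omega))]

-- ===== VERDICT (by name: the statement is the Claim_ definition above) =====
theorem extract_def_content_spec : Claim_equal_extract_def_content := by
  intro entry_text start _ hpre
  unfold Spec_extract_def_content extract_def_content extract_def_content_alt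
  by_cases hs : 0 ≤ start
  · exact pvMain ((entry_text.toList.length : Int) + 1 - start).toNat entry_text.toList
      start start 0 none hs le_rfl
  · have hno : ¬ ("</def>".toList <:+: entry_text.toList) := by
      rcases hpre with hs' | hin
      · exact absurd hs' hs
      · have := (PySem.Chars.isIn_eq_false_iff "</def>".toList entry_text.toList).1
        simp only [PySem.Str.isIn] at hin
        exact this hin
    rw [pvANoCloseAll entry_text.toList start start 0 none hno]
    rw [extractLoopB]
    by_cases hc : PySem.Chars.findFrom entry_text.toList "</def>".toList start none = -1
    · rw [dif_pos hc]
    · exact absurd (pvFindFromInfix _ _ _ hc) hno
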